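-- pv_equiv track=rewrite | github.com/alyalsayed/Graduation_Project | utils/utils.py | reverse_arabic
-- ===== SOURCE A (Python) =====
-- def reverse_arabic(text):
--     segments = []
--     current_segment = ""
--     is_number = text[0].isdigit()
--
--     for char in text:
--         if char.isdigit() == is_number:
--             current_segment += char
--         else:
--             if current_segment:
--                 segments.append(current_segment)
--             current_segment = char
--             is_number = not is_number
--
--     segments.append(current_segment)
--
--     reversed_text = ""
--     for segment in segments:
--         if segment[0].isdigit():
--             reversed_text += segment
--         else:
--             reversed_text = segment[::-1] + reversed_text
--
--     return reversed_text
-- ===== SOURCE B (Python) =====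
-- def reverse_arabic(text):
--     non_digits = ''.join(reversed([c for c in text if not c.isdigit()]))
--     digits = ''.join(c for c in text if c.isdigit())
--     return non_digits + digits
-- ===== Notes on version B (the rewrite author's own statement) =====
-- stated objective: simpler
-- what changed: B drops A's run-segmentation pass and segment fold entirely: it makes two straight filtered passes (reversed non-digit characters, then digit characters in order) and concatenates them.
-- crash fix: On the empty string A raises IndexError (it reads text[0] before looping) while B naturally returns ''. — e.g. on reverse_arabic(""): A raises IndexError, B returns ""
import Mathlib
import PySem

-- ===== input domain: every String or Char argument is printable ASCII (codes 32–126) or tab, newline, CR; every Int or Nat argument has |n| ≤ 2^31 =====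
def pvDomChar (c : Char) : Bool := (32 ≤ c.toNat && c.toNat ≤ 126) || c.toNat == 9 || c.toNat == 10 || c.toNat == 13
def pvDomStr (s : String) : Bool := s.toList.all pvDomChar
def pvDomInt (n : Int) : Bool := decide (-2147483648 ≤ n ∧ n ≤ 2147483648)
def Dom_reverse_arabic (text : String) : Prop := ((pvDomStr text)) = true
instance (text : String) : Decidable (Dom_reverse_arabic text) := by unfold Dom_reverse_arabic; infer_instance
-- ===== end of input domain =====

-- B replaces A's run-segmentation pass and segment fold by two simple filtered passes
-- (reversed non-digits ++ digits in order); objective: simpler. A raises IndexError on "",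
-- excluded by Pre_; B returns "" there (Raises_ block).


-- ===== PORT A =====
-- first loop of A: state (segments, current_segment, is_number), over the remaining chars
def revArabicLoop1 : List (List Char) → List Char → Bool → List Char →
    List (List Char) × List Char × Bool
  | segs, cur, isnum, [] => (segs, cur, isnum)
  | segs, cur, isnum, c :: rest =>
    if PySem.Chars.isdigit c == isnum then
      revArabicLoop1 segs (cur ++ [c]) isnum rest
    else
      revArabicLoop1 (if cur ≠ [] then segs ++ [cur] else segs) [c] (!isnum) rest

-- second loop of A: fold the segments into reversed_text.
-- segment[0] is ported as headD ' ' (under Pre_ every segment is nonempty, so it never defaults).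
def revArabicLoop2 : List (List Char) → List Char → List Char
  | [], rt => rt
  | seg :: rest, rt =>
    if PySem.Chars.isdigit (seg.headD ' ') then revArabicLoop2 rest (rt ++ seg)
    else revArabicLoop2 rest (seg.reverse ++ rt)

-- text[0].isdigit() is ported as isdigit (headD ' '); on the empty string Python raises
-- IndexError, which Pre_ excludes.
def reverse_arabic (text : String) : String :=
  String.ofList (revArabicLoop2
    ((revArabicLoop1 [] [] (PySem.Chars.isdigit (text.toList.headD ' ')) text.toList).1
      ++ [(revArabicLoop1 [] [] (PySem.Chars.isdigit (text.toList.headD ' ')) text.toList).2.1])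
    [])

-- ===== PORT B =====
def reverse_arabic_alt (text : String) : String :=
  String.ofList ((text.toList.filter (fun c => !PySem.Chars.isdigit c)).reverse
             ++ text.toList.filter (fun c => PySem.Chars.isdigit c))

-- ===== PRECONDITION & SPEC =====
-- Pre_ excludes only the empty string, on which A raises IndexError at text[0].
def Pre_reverse_arabic (text : String) : Prop := text ≠ ""
instance (text : String) : Decidable (Pre_reverse_arabic text) := by unfold Pre_reverse_arabic; infer_instance
def pvWitness_reverse_arabic : String := "ab12cd"

-- On the empty string A raises IndexError (it reads text[0] before looping) while B naturally returns ''.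
def Raises_reverse_arabic (text : String) : Prop := text = ""
instance (text : String) : Decidable (Raises_reverse_arabic text) := by unfold Raises_reverse_arabic; infer_instance
def pvRaiseWitness_reverse_arabic : String := ""
def pvRaiseWitnessOut_reverse_arabic : String := ""

def Spec_reverse_arabic (text : String) (out : String) : Prop := out = reverse_arabic_alt text
instance (text : String) (out : String) : Decidable (Spec_reverse_arabic text out) := by unfold Spec_reverse_arabic; infer_instance

-- ===== CLAIM (what is proved, stated in full; the proofs are below) =====
def Claim_equal_reverse_arabic : Prop := ∀ (text : String), Dom_reverse_arabic text → Pre_reverse_arabic text → Spec_reverse_arabic text (reverse_arabic text)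
def Claim_raises_reverse_arabic : Prop := (∀ (text : String), Dom_reverse_arabic text → Raises_reverse_arabic text → ¬ Pre_reverse_arabic text) ∧ (Dom_reverse_arabic (pvRaiseWitness_reverse_arabic) ∧ Raises_reverse_arabic (pvRaiseWitness_reverse_arabic) ∧ reverse_arabic_alt (pvRaiseWitness_reverse_arabic) = pvRaiseWitnessOut_reverse_arabic)

-- ===== LEMMAS AND PROOFS =====

-- a segment is homogeneous: all its characters have the same digit-class b
def Homog (seg : List Char) : Prop := ∃ b, ∀ c ∈ seg, PySem.Chars.isdigit c = b

theorem loop2_char (segs : List (List Char)) (h : ∀ seg ∈ segs, Homog seg) (rt : List Char) :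
    revArabicLoop2 segs rt =
      (segs.flatten.filter (fun c => !PySem.Chars.isdigit c)).reverse ++ rt
        ++ segs.flatten.filter (fun c => PySem.Chars.isdigit c) := by
  induction segs generalizing rt with
  | nil => simp [revArabicLoop2]
  | cons seg rest ih =>
    obtain ⟨b, hb⟩ := h seg (by simp)
    have hrest : ∀ s ∈ rest, Homog s := fun s hs => h s (by simp [hs])
    cases seg with
    | nil =>
      simp [revArabicLoop2, PySem.Chars.isdigit, ih hrest]
    | cons c cs =>
      have hc : PySem.Chars.isdigit c = b := hb c (by simp)
      have hfd : (c :: cs).filter (fun x => PySem.Chars.isdigit x) =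
          if b then c :: cs else [] := by
        cases b <;> simp_all [List.filter_eq_self, List.filter_eq_nil_iff]
      have hfn : (c :: cs).filter (fun x => !PySem.Chars.isdigit x) =
          if b then [] else c :: cs := by
        cases b <;> simp_all [List.filter_eq_self, List.filter_eq_nil_iff]
      simp only [revArabicLoop2, List.headD_cons, hc]
      rw [List.flatten_cons, List.filter_append, List.filter_append, hfd, hfn]
      cases b with
      | true => simp [ih hrest]
      | false => simp [ih hrest]

theorem loop1_char (rest : List Char) :
    ∀ (segs : List (List Char)) (cur : List Char) (isnum : Bool),
      (∀ seg ∈ segs, Homog seg) → (∀ c ∈ cur, PySem.Chars.isdigit c = isnum) →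
      let s := revArabicLoop1 segs cur isnum rest
      (∀ seg ∈ s.1 ++ [s.2.1], Homog seg) ∧
        (s.1 ++ [s.2.1]).flatten = (segs ++ [cur]).flatten ++ rest := by
  induction rest with
  | nil =>
    intro segs cur isnum hsegs hcur
    refine ⟨?_, by simp [revArabicLoop1]⟩
    intro seg hseg
    simp [revArabicLoop1] at hseg
    rcases hseg with h | h
    · exact hsegs seg h
    · exact ⟨isnum, h ▸ hcur⟩
  | cons c rest ih =>
    intro segs cur isnum hsegs hcur
    simp only [revArabicLoop1]
    by_cases hc : PySem.Chars.isdigit c = isnum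
    · simp only [hc, beq_self_eq_true, if_true]
      have hcur' : ∀ x ∈ cur ++ [c], PySem.Chars.isdigit x = isnum := by
        intro x hx; rcases List.mem_append.mp hx with h | h
        · exact hcur x h
        · simp at h; subst h; exact hc
      obtain ⟨h1, h2⟩ := ih segs (cur ++ [c]) isnum hsegs hcur'
      exact ⟨h1, by simp [h2]⟩
    · simp only [beq_iff_eq, hc, if_false]
      have hnew : ∀ x ∈ [c], PySem.Chars.isdigit x = !isnum := by
        intro x hx
        rw [List.mem_singleton] at hx; subst hx
        cases hd : PySem.Chars.isdigit x <;> cases hn : isnum <;> simp_all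
      by_cases hcurne : cur ≠ []
      · rw [if_pos hcurne]
        have hsegs' : ∀ seg ∈ segs ++ [cur], Homog seg := by
          intro seg hseg
          rcases List.mem_append.mp hseg with h | h
          · exact hsegs seg h
          · simp at h; exact ⟨isnum, h ▸ hcur⟩
        obtain ⟨h1, h2⟩ := ih (segs ++ [cur]) [c] (!isnum) hsegs' hnew
        exact ⟨h1, by simp [h2]⟩
      · rw [if_neg hcurne]
        obtain ⟨h1, h2⟩ := ih segs [c] (!isnum) hsegs hnew
        have : cur = [] := by simpa using hcurne
        subst this
        exact ⟨h1, by simp [h2]⟩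

-- ===== VERDICT (by name: the statement is the Claim_ definition above) =====
theorem reverse_arabic_spec : Claim_equal_reverse_arabic := by
  intro text _ _
  unfold Spec_reverse_arabic reverse_arabic reverse_arabic_alt
  obtain ⟨h1, h2⟩ := loop1_char text.toList [] [] (PySem.Chars.isdigit (text.toList.headD ' '))
    (by simp) (by simp)
  rw [loop2_char _ h1]
  simp at h2
  simp [h2]

@[simp] theorem reverse_arabic_raises : Claim_raises_reverse_arabic := by
  unfold Claim_raises_reverse_arabic
  exact ⟨fun text _ hr => by simp [Pre_reverse_arabic, Raises_reverse_arabic] at hr ⊢; exact hr, by decide⟩
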